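-- pv_equiv track=rewrite | github.com/efij/pii-leak-hunter | pii_leak_hunter/hunts/live.py | _diff_signature_summary
-- ===== SOURCE A (Python) =====
-- def _diff_signature_summary(
--     current: dict[str, set[str]],
--     known: dict[str, set[str]],
-- ) -> dict[str, dict[str, int]]:
--     summary: dict[str, dict[str, int]] = {}
--     for name, current_values in current.items():
--         previous_values = known.get(name, set())
--         summary[name] = {
--             "new": len(current_values - previous_values),
--             "existing": len(current_values & previous_values),
--             "resolved": len(previous_values - current_values),
--             "total_current": len(current_values),
--             "total_baseline": len(previous_values),
--         }
--     return summary
-- ===== SOURCE B (Python) =====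
-- def _diff_signature_summary(
--     current: dict[str, set[str]],
--     known: dict[str, set[str]],
-- ) -> dict[str, dict[str, int]]:
--     summary: dict[str, dict[str, int]] = {}
--     for name, current_values in current.items():
--         previous_values = known.get(name, set())
--         # multiplicity of each value across both sets: 2 <=> present in both
--         seen: dict[str, int] = {}
--         for v in list(current_values) + list(previous_values):
--             seen[v] = seen.get(v, 0) + 1
--         existing = sum(1 for c in seen.values() if c == 2)
--         total_current = len(current_values)
--         total_baseline = len(previous_values)
--         summary[name] = {
--             "new": total_current - existing,
--             "existing": existing,
--             "resolved": total_baseline - existing,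
--             "total_current": total_current,
--             "total_baseline": total_baseline,
--         }
--     return summary
-- ===== Notes on version B (the rewrite author's own statement) =====
-- stated objective: alternative
-- what changed: Instead of three per-key set operations (difference, intersection, reverse difference), B builds one multiplicity counter over the concatenation of both value sets, reads 'existing' as the number of values with multiplicity 2, and derives 'new' and 'resolved' arithmetically from the two set sizes.
import Mathlib
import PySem

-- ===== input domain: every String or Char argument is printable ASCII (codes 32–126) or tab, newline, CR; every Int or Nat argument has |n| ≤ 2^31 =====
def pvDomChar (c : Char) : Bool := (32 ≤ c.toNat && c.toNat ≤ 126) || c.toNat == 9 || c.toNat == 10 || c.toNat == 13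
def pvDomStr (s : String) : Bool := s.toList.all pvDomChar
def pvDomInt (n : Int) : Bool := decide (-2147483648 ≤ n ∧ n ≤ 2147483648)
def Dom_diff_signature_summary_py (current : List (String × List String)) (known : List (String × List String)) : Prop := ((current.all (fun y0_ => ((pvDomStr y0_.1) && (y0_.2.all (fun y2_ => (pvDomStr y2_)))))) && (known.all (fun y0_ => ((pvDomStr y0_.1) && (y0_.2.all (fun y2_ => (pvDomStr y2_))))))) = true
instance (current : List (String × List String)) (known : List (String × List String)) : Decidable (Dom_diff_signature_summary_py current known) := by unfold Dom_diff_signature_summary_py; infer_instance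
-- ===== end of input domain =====

-- B replaces the three per-key set operations with a multiplicity counter over the concatenation of both value sets, reading 'existing' off multiplicity 2 and deriving 'new'/'resolved' by subtraction from the set sizes (alternative algorithm, same cost).


-- ===== PORT A =====
def diff_signature_summary_py (current : List (String × List String)) (known : List (String × List String)) : List (String × List (String × Int)) :=
  ((PySem.Dict.ofList current).items.foldl (fun summary p =>
      let current_values := PySem.Set.ofList p.2
      let previous_values := PySem.Set.ofList ((PySem.Dict.ofList known).getD p.1 [])
      summary.insert p.1
        [("new", ((PySem.Set.diff current_values previous_values).length : Int)),
         ("existing", ((PySem.Set.inter current_values previous_values).length : Int)),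
         ("resolved", ((PySem.Set.diff previous_values current_values).length : Int)),
         ("total_current", (current_values.length : Int)),
         ("total_baseline", (previous_values.length : Int))])
    PySem.Dict.empty).items

-- ===== PORT B =====
def diff_signature_summary_py_alt (current : List (String × List String)) (known : List (String × List String)) : List (String × List (String × Int)) :=
  ((PySem.Dict.ofList current).items.foldl (fun summary p =>
      let current_values := PySem.Set.ofList p.2
      let previous_values := PySem.Set.ofList ((PySem.Dict.ofList known).getD p.1 [])
      -- seen[v] = seen.get(v, 0) + 1 over list(current_values) + list(previous_values)
      let seen : PySem.Dict String Int := (current_values ++ previous_values).foldl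
        (fun d v => d.insert v (d.getD v 0 + 1)) PySem.Dict.empty
      -- existing = sum(1 for c in seen.values() if c == 2)
      let existing : Int := seen.values.foldl (fun acc c => if c == 2 then acc + 1 else acc) 0
      let total_current : Int := current_values.length
      let total_baseline : Int := previous_values.length
      summary.insert p.1
        [("new", total_current - existing),
         ("existing", existing),
         ("resolved", total_baseline - existing),
         ("total_current", total_current),
         ("total_baseline", total_baseline)])
    PySem.Dict.empty).items

-- ===== PRECONDITION & SPEC =====
def Spec_diff_signature_summary_py (current : List (String × List String)) (known : List (String × List String)) (out : List (String × List (String × Int))) : Prop := out = diff_signature_summary_py_alt current known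
instance (current : List (String × List String)) (known : List (String × List String)) (out : List (String × List (String × Int))) : Decidable (Spec_diff_signature_summary_py current known out) := by unfold Spec_diff_signature_summary_py; infer_instance

-- ===== CLAIM (what is proved, stated in full; the proofs are below) =====
def Claim_equal_diff_signature_summary_py : Prop := ∀ (current : List (String × List String)) (known : List (String × List String)), Dom_diff_signature_summary_py current known → Spec_diff_signature_summary_py current known (diff_signature_summary_py current known)

-- ===== LEMMAS AND PROOFS =====

-- countP on a duplicate-free list is a Finset cardinality
lemma pvCountP_toFinset (l : List String) (h : l.Nodup) (p : String → Bool) :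
    l.countP p = (l.toFinset.filter (fun x => p x)).card := by
  rw [List.countP_eq_length_filter, ← List.toFinset_filter,
    List.toFinset_card_of_nodup (h.filter p)]

-- count of an element in a duplicate-free list is its membership indicator
lemma pvCount_nodup (l : List String) (h : l.Nodup) (k : String) :
    l.count k = if k ∈ l then 1 else 0 := by
  split_ifs with hm
  · exact List.count_eq_one_of_mem h hm
  · exact List.count_eq_zero_of_not_mem hm

-- the number of multiplicity-2 values in the counter of a ++ b equals |a ∩ b|
lemma pvExisting (a b : List String) (ha : a.Nodup) (hb : b.Nodup) :
    (PySem.Set.ofList (a ++ b)).countP (fun k => ((((a ++ b).count k : Int)) == 2))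
      = a.countP (fun k => PySem.Set.contains b k) := by
  have hcong : ∀ k ∈ PySem.Set.ofList (a ++ b),
      (((((a ++ b).count k : Int)) == 2) = true) ↔ ((decide (k ∈ a) && decide (k ∈ b)) = true) := by
    intro k _
    rw [List.count_append, pvCount_nodup a ha, pvCount_nodup b hb]
    by_cases h1 : k ∈ a <;> by_cases h2 : k ∈ b <;> simp [h1, h2]
  rw [List.countP_congr hcong]
  have hc2 : ∀ k ∈ a, ((PySem.Set.contains b k) = true) ↔ ((decide (k ∈ a) && decide (k ∈ b)) = true) := by
    intro k hk; simp [PySem.Set.contains_eq_listContains, hk]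
  rw [List.countP_congr hc2]
  rw [pvCountP_toFinset _ (PySem.Set.nodup_ofList _), pvCountP_toFinset a ha]
  congr 1
  apply Finset.ext
  intro x
  simp [PySem.Set.mem_ofList]
  tauto

-- |a ∩ b| = |b ∩ a| for duplicate-free lists
lemma pvInterComm (a b : List String) (ha : a.Nodup) (hb : b.Nodup) :
    a.countP (fun k => PySem.Set.contains b k) = b.countP (fun k => PySem.Set.contains a k) := by
  have hc : ∀ (x y : List String), ∀ k ∈ x,
      ((PySem.Set.contains y k) = true) ↔ (decide (k ∈ y) = true) := by
    intro x y k _; simp [PySem.Set.contains_eq_listContains]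
  rw [List.countP_congr (hc a b), List.countP_congr (hc b a),
    pvCountP_toFinset a ha, pvCountP_toFinset b hb]
  congr 1
  apply Finset.ext
  intro x
  simp
  tauto

-- splitting a by membership in b: |a ∖ b| + |a ∩ b| = |a|
lemma pvDiffSplit (a b : List String) :
    (PySem.Set.diff a b).length + a.countP (fun k => PySem.Set.contains b k) = a.length := by
  have h1 : (PySem.Set.diff a b).length = a.countP (fun k => !(PySem.Set.contains b k)) := by
    rw [List.countP_eq_length_filter]; rfl
  have h2 : a.countP (fun k => !(PySem.Set.contains b k))
      = a.countP (fun k => decide (¬ (PySem.Set.contains b k) = true)) := by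
    apply List.countP_congr; intro x _; simp
  have h3 := List.length_eq_countP_add_countP (p := fun k => PySem.Set.contains b k) (l := a)
  omega

-- one step of the two summary loops produces the same record
lemma pvStep_eq (known : List (String × List String)) :
    (fun (summary : PySem.Dict String (List (String × Int))) (p : String × List String) =>
      let current_values := PySem.Set.ofList p.2
      let previous_values := PySem.Set.ofList ((PySem.Dict.ofList known).getD p.1 [])
      summary.insert p.1
        [("new", ((PySem.Set.diff current_values previous_values).length : Int)),
         ("existing", ((PySem.Set.inter current_values previous_values).length : Int)),
         ("resolved", ((PySem.Set.diff previous_values current_values).length : Int)),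
         ("total_current", (current_values.length : Int)),
         ("total_baseline", (previous_values.length : Int))])
    = (fun (summary : PySem.Dict String (List (String × Int))) (p : String × List String) =>
      let current_values := PySem.Set.ofList p.2
      let previous_values := PySem.Set.ofList ((PySem.Dict.ofList known).getD p.1 [])
      let seen : PySem.Dict String Int := (current_values ++ previous_values).foldl
        (fun d v => d.insert v (d.getD v 0 + 1)) PySem.Dict.empty
      let existing : Int := seen.values.foldl (fun acc c => if c == 2 then acc + 1 else acc) 0
      let total_current : Int := current_values.length
      let total_baseline : Int := previous_values.length
      summary.insert p.1
        [("new", total_current - existing),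
         ("existing", existing),
         ("resolved", total_baseline - existing),
         ("total_current", total_current),
         ("total_baseline", total_baseline)]) := by
  funext summary p
  dsimp only
  set a := PySem.Set.ofList p.2 with hadef
  set b := PySem.Set.ofList ((PySem.Dict.ofList known).getD p.1 []) with hbdef
  have ha : a.Nodup := PySem.Set.nodup_ofList _
  have hb : b.Nodup := PySem.Set.nodup_ofList _
  -- identify the counter loop and turn the summation loop into a countP
  rw [PySem.Dict.foldl_insert_getD_add_one_eq_counter]
  have hvals : (PySem.Dict.counter (a ++ b)).values
      = (PySem.Set.ofList (a ++ b)).map (fun k => (((a ++ b).count k : Int))) := by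
    show ((PySem.Dict.counter (a ++ b)).items.map (·.2)) = _
    rw [PySem.Dict.items_counter]
    simp
  have hsum : ((PySem.Dict.counter (a ++ b)).values.foldl
      (fun acc c => if c == 2 then acc + 1 else acc) 0 : Int)
      = ((a.countP (fun k => PySem.Set.contains b k) : Int)) := by
    rw [hvals, PySem.List.foldl_count_if, List.countP_map]
    simp only [Function.comp_def, zero_add]
    rw [pvExisting a b ha hb]
  rw [hsum]
  -- the three counters agree entrywise
  have hsplit1 := pvDiffSplit a b
  have hsplit2 := pvDiffSplit b a
  have hcomm := pvInterComm a b ha hb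
  have hnew : ((PySem.Set.diff a b).length : Int)
      = (a.length : Int) - (a.countP (fun k => PySem.Set.contains b k) : Int) := by omega
  have hexist : ((PySem.Set.inter a b).length : Int)
      = (a.countP (fun k => PySem.Set.contains b k) : Int) := by
    rw [show PySem.Set.inter a b = a.filter (fun k => PySem.Set.contains b k) from rfl,
      ← List.countP_eq_length_filter]
  have hres : ((PySem.Set.diff b a).length : Int)
      = (b.length : Int) - (a.countP (fun k => PySem.Set.contains b k) : Int) := by omega
  rw [hnew, hexist, hres]

-- ===== VERDICT (by name: the statement is the Claim_ definition above) =====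
theorem diff_signature_summary_py_spec : Claim_equal_diff_signature_summary_py := by
  intro current known _
  unfold Spec_diff_signature_summary_py diff_signature_summary_py diff_signature_summary_py_alt
  rw [pvStep_eq known]
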